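-- pv_equiv track=rewrite | github.com/sjarmak/codeprobe | src/codeprobe/mining/comprehension.py | _resolve_import_target
-- ===== SOURCE A (Python) =====
-- def _resolve_import_target(raw: str, known_modules: set[str]) -> str | None:
--     """Best-effort match of a raw import target to an internal module.
--
--     Tries the full dotted name, then progressively shorter prefixes. Also
--     tries each known module that is a prefix of ``raw``.
--     """
--     if raw in known_modules:
--         return raw
--     # Longest-prefix match: e.g. ``from codeprobe.models.task import Task``
--     # resolves to ``codeprobe.models.task``. If Task is a submodule we catch
--     # it below.
--     parts = raw.split(".")
--     for i in range(len(parts), 0, -1):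
--         candidate = ".".join(parts[:i])
--         if candidate in known_modules:
--             return candidate
--     return None
-- ===== SOURCE B (Python) =====
-- def _resolve_import_target(raw: str, known_modules: set[str]) -> str | None:
--     """Scan the known modules once, keeping the longest one that is a dotted
--     prefix of ``raw`` (i.e. equal to it, or followed by a '.')."""
--     best = None
--     for m in known_modules:
--         if m == raw or raw.startswith(m + "."):
--             if best is None or len(best) < len(m):
--                 best = m
--     return best
-- ===== Notes on version B (the rewrite author's own statement) =====
-- stated objective: alternative
-- what changed: Instead of splitting raw into parts and probing each shrinking dotted prefix against the module set, B scans known_modules once and keeps the longest module that is a dotted prefix of raw (m == raw or raw.startswith(m + '.')).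
import Mathlib
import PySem

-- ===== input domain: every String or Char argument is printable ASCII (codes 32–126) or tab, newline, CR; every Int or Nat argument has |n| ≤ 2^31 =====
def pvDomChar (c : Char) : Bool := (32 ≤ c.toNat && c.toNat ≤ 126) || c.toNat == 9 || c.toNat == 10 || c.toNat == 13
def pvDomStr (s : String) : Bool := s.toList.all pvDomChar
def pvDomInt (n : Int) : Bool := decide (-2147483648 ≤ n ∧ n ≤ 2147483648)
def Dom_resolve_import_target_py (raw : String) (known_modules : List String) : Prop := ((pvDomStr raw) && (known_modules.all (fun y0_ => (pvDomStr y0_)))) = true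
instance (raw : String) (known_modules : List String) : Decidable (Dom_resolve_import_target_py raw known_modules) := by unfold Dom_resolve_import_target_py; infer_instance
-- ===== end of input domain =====

-- B inverts the lookup: it scans known_modules once for the longest dotted prefix of raw,
-- instead of probing each shrinking dotted prefix of raw against the module set (alternative, same cost).


-- ===== PORT A =====
-- the 'for i in range(len(parts), 0, -1)' loop: first candidate '.'.join(parts[:i]) found in known
def pvCandLoopA (parts : List String) (known : List String) : List Int → Option String
  | [] => none
  | i :: rest =>
      let candidate := PySem.Str.join "." (PySem.List.slice parts none (some i))
      if known.contains candidate then some candidate else pvCandLoopA parts known rest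

def resolve_import_target_py (raw : String) (known_modules : List String) : Option String :=
  if known_modules.contains raw then some raw
  else
    -- raw.split("."): the separator "." is non-empty, so split? always returns some
    let parts : List String := (PySem.Str.split? raw ".").getD []
    pvCandLoopA parts known_modules (PySem.List.pyRange (parts.length : Int) 0 (-1))

-- ===== PORT B =====
def resolve_import_target_py_alt (raw : String) (known_modules : List String) : Option String :=
  known_modules.foldl
    (fun best m =>
      if m == raw || PySem.Str.startswith raw (m ++ ".") then
        match best with
        | none => some m
        | some b => if PySem.Str.len b < PySem.Str.len m then some m else some b
      else best)
    none

-- ===== PRECONDITION & SPEC =====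
def Spec_resolve_import_target_py (raw : String) (known_modules : List String) (out : Option String) : Prop := out = resolve_import_target_py_alt raw known_modules
instance (raw : String) (known_modules : List String) (out : Option String) : Decidable (Spec_resolve_import_target_py raw known_modules out) := by unfold Spec_resolve_import_target_py; infer_instance

-- ===== CLAIM (what is proved, stated in full; the proofs are below) =====
def Claim_equal_resolve_import_target_py : Prop := ∀ (raw : String) (known_modules : List String), Dom_resolve_import_target_py raw known_modules → Spec_resolve_import_target_py raw known_modules (resolve_import_target_py raw known_modules)

-- ===== LEMMAS AND PROOFS =====

-- "m is a dotted prefix of r"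
def pvQ (r m : List Char) : Prop := m = r ∨ m ++ ['.'] <+: r

-- structural model of raw.split(".") with an accumulated current piece
def pvSplit : List Char → List Char → List (List Char)
  | pre, [] => [pre]
  | pre, a :: rest => if a = '.' then pre :: pvSplit [] rest else pvSplit (pre ++ [a]) rest

-- all dotted prefixes of r, in increasing length order
def pvCands : List Char → List (List Char)
  | [] => [[]]
  | a :: rest => if a = '.' then [] :: (pvCands rest).map (List.cons '.') else (pvCands rest).map (List.cons a)

-- B's fold step, named for the proofs (definitionally B's lambda)
def pvStepB (raw : String) : Option String → String → Option String :=
  fun best m =>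
    if m == raw || PySem.Str.startswith raw (m ++ ".") then
      match best with
      | none => some m
      | some b => if PySem.Str.len b < PySem.Str.len m then some m else some b
    else best

theorem pvB_eq_foldl (raw : String) (ks : List String) :
    resolve_import_target_py_alt raw ks = ks.foldl (pvStepB raw) none := rfl

theorem pv_go_eq (fuel : Nat) : ∀ (l cur : List Char) (acc : List (List Char)),
    l.length ≤ fuel →
    PySem.Chars.splitOn.go ['.'] fuel l cur acc = acc.reverse ++ pvSplit cur.reverse l := by
  induction fuel with
  | zero =>
      intro l cur acc h
      have hl : l = [] := List.eq_nil_of_length_eq_zero (Nat.le_zero.mp h)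
      subst hl
      simp [PySem.Chars.splitOn.go, pvSplit]
  | succ n ih =>
      intro l cur acc h
      cases l with
      | nil => simp [PySem.Chars.splitOn.go, pvSplit]
      | cons c rest =>
          by_cases hc : c = '.'
          · subst hc
            have hrec := ih rest [] (cur.reverse :: acc) (by simpa using Nat.lt_succ_iff.mp (by simpa using h))
            simp [PySem.Chars.splitOn.go, List.isPrefixOf, hrec, pvSplit]
          · have hrec := ih rest (c :: cur) acc (by simpa using Nat.lt_succ_iff.mp (by simpa using h))
            have hne : ('.' == c) = false := by
              simp [Ne.symm hc]
            simp [PySem.Chars.splitOn.go, List.isPrefixOf, hne, hrec, pvSplit, hc]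

theorem pv_splitOn_eq (l : List Char) : PySem.Chars.splitOn l ['.'] = pvSplit [] l := by
  have := pv_go_eq (l.length + 1) l [] [] (by omega)
  simpa [PySem.Chars.splitOn] using this

theorem pv_split_shift (l : List Char) : ∀ pre, pvSplit pre l = List.modifyHead (pre ++ ·) (pvSplit [] l) := by
  induction l with
  | nil => intro pre; simp [pvSplit]
  | cons a rest ih =>
      intro pre
      by_cases ha : a = '.'
      · subst ha; simp [pvSplit]
      · have h2 : pvSplit [] (a :: rest) = pvSplit [a] rest := by
          simp [pvSplit, ha]
        have h3 : pvSplit pre (a :: rest) = pvSplit (pre ++ [a]) rest := by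
          simp [pvSplit, ha]
        rw [h3, h2, ih (pre ++ [a]), ih [a], List.modifyHead_modifyHead]
        congr 1
        funext x
        simp

theorem pv_split_len_pos (l : List Char) : ∀ pre, 0 < (pvSplit pre l).length := by
  induction l with
  | nil => intro pre; simp [pvSplit]
  | cons a rest ih =>
      intro pre
      by_cases ha : a = '.'
      · subst ha; simp [pvSplit]
      · simpa [pvSplit, ha] using ih (pre ++ [a])

theorem pv_join_singleton (x : List Char) : PySem.Chars.join ['.'] [x] = x := by
  simp [PySem.Chars.join, List.intercalate]

theorem pv_join_cons (x y : List Char) (t : List (List Char)) :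
    PySem.Chars.join ['.'] (x :: y :: t) = x ++ '.' :: PySem.Chars.join ['.'] (y :: t) := by
  simp [PySem.Chars.join, List.intercalate]

theorem pv_join_cons_head (a : Char) (s0 : List Char) (t : List (List Char)) :
    PySem.Chars.join ['.'] ((a :: s0) :: t) = a :: PySem.Chars.join ['.'] (s0 :: t) := by
  cases t with
  | nil => simp [pv_join_singleton]
  | cons y t' => simp [pv_join_cons]

theorem pv_joinTake (r : List Char) :
    (List.range (pvSplit [] r).length).map
      (fun k => PySem.Chars.join ['.'] ((pvSplit [] r).take (k+1))) = pvCands r := by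
  induction r with
  | nil => simp [pvSplit, pvCands, pv_join_singleton]
  | cons a rest ih =>
      obtain ⟨s0, S', hS⟩ : ∃ s0 S', pvSplit [] rest = s0 :: S' := by
        cases h : pvSplit [] rest with
        | nil => exact absurd (h ▸ pv_split_len_pos rest []) (by simp)
        | cons s0 S' => exact ⟨s0, S', rfl⟩
      by_cases ha : a = '.'
      · subst ha
        have h1 : pvSplit [] ('.' :: rest) = [] :: pvSplit [] rest := by simp [pvSplit]
        rw [h1, pvCands, if_pos rfl, ← ih]
        simp only [List.length_cons, List.range_succ_eq_map, List.map_cons, List.map_map]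
        congr 1
        apply List.map_congr_left
        intro k hk
        simp only [Function.comp_apply, Nat.succ_eq_add_one, List.take_succ_cons, hS]
        rw [pv_join_cons]
        simp
      · have h1 : pvSplit [] (a :: rest) = List.modifyHead (fun x => [a] ++ x) (pvSplit [] rest) := by
          simp only [pvSplit, ha, if_false]
          exact pv_split_shift rest [a]
        rw [h1, hS]
        simp only [List.modifyHead, pvCands, ha, if_false, ← ih, hS]
        simp only [List.length_cons, List.map_map]
        apply List.map_congr_left
        intro k hk
        simp only [Function.comp]
        cases k with
        | zero => simpa using pv_join_cons_head a s0 []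
        | succ k' =>
            simp only [List.take_succ_cons]
            exact pv_join_cons_head a s0 _

theorem pv_mem_cands (r : List Char) : ∀ m, m ∈ pvCands r ↔ pvQ r m := by
  induction r with
  | nil =>
      intro m
      simp [pvCands, pvQ]
  | cons a rest ih =>
      intro m
      by_cases ha : a = '.'
      · subst ha
        have hcand : pvCands ('.' :: rest) = [] :: (pvCands rest).map (List.cons '.') := by
          simp [pvCands]
        rw [hcand]
        simp only [List.mem_cons, List.mem_map, pvQ]
        constructor
        · rintro (rfl | ⟨m'', hm'', rfl⟩)
          · exact Or.inr (by simp [List.cons_prefix_cons])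
          · rcases (ih m'').mp hm'' with rfl | h
            · exact Or.inl rfl
            · exact Or.inr (by simpa [List.cons_prefix_cons] using h)
        · rintro (rfl | h)
          · exact Or.inr ⟨rest, (ih rest).mpr (Or.inl rfl), rfl⟩
          · cases m with
            | nil => exact Or.inl rfl
            | cons x m' =>
                rw [List.cons_append, List.cons_prefix_cons] at h
                exact Or.inr ⟨m', (ih m').mpr (Or.inr h.2), by rw [h.1]⟩
      · have hcand : pvCands (a :: rest) = (pvCands rest).map (List.cons a) := by
          simp [pvCands, ha]
        rw [hcand]
        simp only [List.mem_map, pvQ]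
        constructor
        · rintro ⟨m'', hm'', rfl⟩
          rcases (ih m'').mp hm'' with rfl | h
          · exact Or.inl rfl
          · exact Or.inr (by simpa [List.cons_prefix_cons] using h)
        · rintro (rfl | h)
          · exact ⟨rest, (ih rest).mpr (Or.inl rfl), rfl⟩
          · cases m with
            | nil =>
                rw [List.nil_append] at h
                exact absurd (List.cons_prefix_cons.mp h).1.symm ha
            | cons x m' =>
                rw [List.cons_append, List.cons_prefix_cons] at h
                exact ⟨m', (ih m').mpr (Or.inr h.2), by rw [h.1]⟩

theorem pv_cands_lt (r : List Char) : (pvCands r).Pairwise (fun u v => u.length < v.length) := by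
  induction r with
  | nil => simp [pvCands]
  | cons a rest ih =>
      by_cases ha : a = '.'
      · subst ha
        simp only [pvCands, if_pos rfl]
        refine List.Pairwise.cons ?_ ?_
        · intro v hv
          rcases List.mem_map.mp hv with ⟨m, _, he⟩
          simp [← he]
        · rw [List.pairwise_map]
          exact ih.imp (by intro u v h; simpa using h)
      · simp only [pvCands, ha, if_false]
        rw [List.pairwise_map]
        exact ih.imp (by intro u v h; simpa using h)

theorem pv_Q_prefix {r m : List Char} (h : pvQ r m) : m <+: r := by
  rcases h with h | h
  · exact h ▸ List.prefix_refl m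
  · exact (List.prefix_append m ['.']).trans h

theorem pv_Q_eq {r m₁ m₂ : List Char} (h1 : pvQ r m₁) (h2 : pvQ r m₂)
    (hl : m₁.length = m₂.length) : m₁ = m₂ :=
  (List.prefix_of_prefix_length_le (pv_Q_prefix h1) (pv_Q_prefix h2) (le_of_eq hl)).eq_of_length hl

theorem pv_cond_iff (raw m : String) :
    ((m == raw || PySem.Str.startswith raw (m ++ ".")) = true) ↔ pvQ raw.toList m.toList := by
  rw [Bool.or_eq_true, beq_iff_eq, PySem.Str.startswith_eq, PySem.Chars.startswith_iff, pvQ]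
  constructor
  · rintro (h | h)
    · exact Or.inl (by simp [h])
    · exact Or.inr (by simpa [String.toList_append] using h)
  · rintro (h | h)
    · exact Or.inl (String.toList_inj.mp h)
    · exact Or.inr (by simpa [String.toList_append] using h)

theorem pv_step_pos_none (raw m : String)
    (hcond : (m == raw || PySem.Str.startswith raw (m ++ ".")) = true) :
    pvStepB raw none m = some m := by
  unfold pvStepB
  rw [if_pos hcond]

theorem pv_step_pos_some (raw m b : String)
    (hcond : (m == raw || PySem.Str.startswith raw (m ++ ".")) = true) :
    pvStepB raw (some b) m = if PySem.Str.len b < PySem.Str.len m then some m else some b := by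
  unfold pvStepB
  rw [if_pos hcond]

theorem pv_step_neg (raw m : String) (best : Option String)
    (hcond : ¬ ((m == raw || PySem.Str.startswith raw (m ++ ".")) = true)) :
    pvStepB raw best m = best := by
  unfold pvStepB
  rw [if_neg hcond]

theorem pv_len_lt_iff (b m : String) :
    PySem.Str.len b < PySem.Str.len m ↔ b.toList.length < m.toList.length := by
  rw [PySem.Str.len_eq, PySem.Str.len_eq]
  exact Int.ofNat_lt

theorem pv_B_char (raw : String) (ks : List String) : ∀ (best : Option String),
    (∀ b, best = some b → pvQ raw.toList b.toList) →
    (ks.foldl (pvStepB raw) best = none ∧ best = none ∧ ∀ m ∈ ks, ¬ pvQ raw.toList m.toList) ∨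
    (∃ rb, ks.foldl (pvStepB raw) best = some rb ∧ pvQ raw.toList rb.toList ∧
      (rb ∈ ks ∨ best = some rb) ∧
      (∀ m ∈ ks, pvQ raw.toList m.toList → m.toList.length ≤ rb.toList.length) ∧
      (∀ b, best = some b → b.toList.length ≤ rb.toList.length)) := by
  induction ks with
  | nil =>
      intro best hb
      cases best with
      | none => exact Or.inl ⟨rfl, rfl, by simp⟩
      | some b =>
          refine Or.inr ⟨b, rfl, hb b rfl, Or.inr rfl, by simp, ?_⟩
          intro b' h
          injection h with h2
          rw [h2]
  | cons m ks ih =>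
      intro best hb
      rw [List.foldl_cons]
      by_cases hcond : ((m == raw || PySem.Str.startswith raw (m ++ ".")) = true)
      · -- step takes m or keeps a longer best
        have hQm : pvQ raw.toList m.toList := (pv_cond_iff raw m).mp hcond
        have hstep : (pvStepB raw best m = some m ∧
              (∀ b, best = some b → b.toList.length ≤ m.toList.length)) ∨
            (∃ b, best = some b ∧ pvStepB raw best m = some b ∧ m.toList.length ≤ b.toList.length) := by
          cases best with
          | none => exact Or.inl ⟨pv_step_pos_none raw m hcond, by intro b h; cases h⟩
          | some b =>
              by_cases hlen : PySem.Str.len b < PySem.Str.len m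
              · refine Or.inl ⟨by rw [pv_step_pos_some raw m b hcond, if_pos hlen], ?_⟩
                intro b' h
                injection h with h2
                rw [← h2]
                exact le_of_lt ((pv_len_lt_iff b m).mp hlen)
              · refine Or.inr ⟨b, rfl, by rw [pv_step_pos_some raw m b hcond, if_neg hlen], ?_⟩
                exact Nat.le_of_not_lt (fun hl => hlen ((pv_len_lt_iff b m).mpr hl))
        rcases hstep with ⟨hstep, hold⟩ | ⟨b, hbb, hstep, hmb⟩
        · have hnew : ∀ b', pvStepB raw best m = some b' → pvQ raw.toList b'.toList := by
            intro b' h; rw [hstep] at h; injection h with h2; rw [← h2]; exact hQm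
          rcases ih (pvStepB raw best m) hnew with ⟨h1, h2, _⟩ | ⟨rb, h1, h2, h3, h4, h5⟩
          · rw [hstep] at h2; cases h2
          · refine Or.inr ⟨rb, h1, h2, ?_, ?_, ?_⟩
            · rcases h3 with h3 | h3
              · exact Or.inl (List.mem_cons_of_mem m h3)
              · rw [hstep] at h3; injection h3 with h3'; rw [h3']; exact Or.inl List.mem_cons_self
            · intro m' hm' hQ'
              rcases List.mem_cons.mp hm' with rfl | hm'
              · exact h5 m' hstep
              · exact h4 m' hm' hQ'
            · intro b' hb'
              exact le_trans (hold b' hb') (h5 m hstep)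
        · have hnew : ∀ b', pvStepB raw best m = some b' → pvQ raw.toList b'.toList := by
            intro b' h; rw [hstep] at h; injection h with h2; rw [← h2]; exact hb b hbb
          rcases ih (pvStepB raw best m) hnew with ⟨h1, h2, _⟩ | ⟨rb, h1, h2, h3, h4, h5⟩
          · rw [hstep] at h2; cases h2
          · refine Or.inr ⟨rb, h1, h2, ?_, ?_, ?_⟩
            · rcases h3 with h3 | h3
              · exact Or.inl (List.mem_cons_of_mem m h3)
              · rw [hstep] at h3; rw [hbb, h3]; exact Or.inr rfl
            · intro m' hm' hQ'
              rcases List.mem_cons.mp hm' with rfl | hm'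
              · exact le_trans hmb (h5 b hstep)
              · exact h4 m' hm' hQ'
            · intro b' hb'
              rw [hbb] at hb'
              injection hb' with h2
              rw [← h2]
              exact h5 b hstep
      · -- condition false: best unchanged, m does not qualify
        have hstep : pvStepB raw best m = best := pv_step_neg raw m best hcond
        have hQm : ¬ pvQ raw.toList m.toList := fun h => hcond ((pv_cond_iff raw m).mpr h)
        rw [hstep]
        rcases ih best hb with ⟨h1, h2, h3⟩ | ⟨rb, h1, h2, h3, h4, h5⟩
        · refine Or.inl ⟨h1, h2, ?_⟩
          intro m' hm'
          rcases List.mem_cons.mp hm' with rfl | hm'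
          · exact hQm
          · exact h3 m' hm'
        · refine Or.inr ⟨rb, h1, h2, ?_, ?_, h5⟩
          · rcases h3 with h3 | h3
            · exact Or.inl (List.mem_cons_of_mem m h3)
            · exact Or.inr h3
          · intro m' hm' hQ'
            rcases List.mem_cons.mp hm' with rfl | hm'
            · exact absurd hQ' hQm
            · exact h4 m' hm' hQ'

theorem pv_Aloop_eq_find (parts known : List String) : ∀ (is : List Int), (∀ i ∈ is, 0 ≤ i) →
    pvCandLoopA parts known is =
      (is.map (fun i => PySem.Str.join "." (parts.take i.toNat))).find? (fun c => known.contains c) := by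
  intro is
  induction is with
  | nil => intro _; simp [pvCandLoopA]
  | cons i rest ih =>
      intro h
      have h0 : (0:Int) ≤ i := h i (List.mem_cons_self)
      rw [pvCandLoopA, List.map_cons]
      rw [PySem.List.slice_to parts h0]
      cases hc : known.contains (PySem.Str.join "." (List.take i.toNat parts)) with
      | true =>
          rw [List.find?_cons_of_pos hc]
          simp
      | false =>
          rw [List.find?_cons_of_neg (by rw [hc]; simp), if_neg (by simp)]
          exact ih (fun j hj => h j (List.mem_cons_of_mem i hj))

theorem pv_parts_toList (raw : String) :
    ∃ ps : List String, PySem.Str.split? raw "." = some ps ∧ ps.map String.toList = pvSplit [] raw.toList := by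
  have h := PySem.Str.split?_map raw "."
  have hsep : ("." : String).toList = ['.'] := by decide
  rw [hsep] at h
  cases hs : PySem.Str.split? raw "." with
  | none => rw [hs] at h; simp [PySem.Chars.split?] at h
  | some ps =>
      rw [hs] at h
      refine ⟨ps, rfl, ?_⟩
      simp only [PySem.Chars.split?, List.isEmpty_cons, Option.map_some, if_false,
        Bool.false_eq_true, Option.some.injEq] at h
      rw [h, pv_splitOn_eq]

theorem pv_A_eq_find (raw : String) (known : List String) (h : known.contains raw = false) :
    resolve_import_target_py raw known =
      (((pvCands raw.toList).map (fun m => String.ofList m)).reverse).find? (fun c => known.contains c) := by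
  obtain ⟨ps, hps, hmap⟩ := pv_parts_toList raw
  have hlen : ps.length = (pvSplit [] raw.toList).length := by
    rw [← hmap, List.length_map]
  rw [resolve_import_target_py, if_neg (by simpa using h)]
  simp only [hps, Option.getD_some]
  rw [pv_Aloop_eq_find ps known _ (fun i hi => le_of_lt (PySem.List.mem_pyRange_neg_one.mp hi).1)]
  congr 1
  rw [PySem.List.pyRange_neg_one_eq_reverse, List.map_reverse]
  congr 1
  rw [PySem.List.pyRange_one]
  have h2 : (((ps.length : Int)) + 1 - (0 + 1)).toNat = ps.length := by omega
  rw [h2]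
  simp only [List.map_map]
  rw [← pv_joinTake raw.toList, ← hlen]
  simp only [List.map_map]
  apply List.map_congr_left
  intro k hk
  simp only [Function.comp]
  have h1 : ((0:Int) + 1 + (k:Int)).toNat = k + 1 := by omega
  rw [h1]
  apply String.toList_inj.mp
  rw [String.toList_ofList, PySem.Str.toList_join]
  have hsep : ("." : String).toList = ['.'] := by decide
  rw [hsep, List.map_take, hmap]

-- ===== VERDICT (by name: the statement is the Claim_ definition above) =====
theorem resolve_import_target_py_spec : Claim_equal_resolve_import_target_py := by
  intro raw known _
  unfold Spec_resolve_import_target_py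
  rw [pvB_eq_foldl]
  rcases pv_B_char raw known none (by simp) with ⟨h1, _, h3⟩ | ⟨rb, h1, h2, h3, h4, _⟩
  · -- no qualifier in known: both none
    rw [h1]
    by_cases hc : known.contains raw = true
    · exact absurd (h3 raw (List.contains_iff_mem.mp hc) (Or.inl rfl)) (fun f => f)
    · rw [pv_A_eq_find raw known (by simpa using hc)]
      rw [List.find?_eq_none]
      intro x hx
      rcases List.mem_map.mp (List.mem_reverse.mp hx) with ⟨m, hm, he⟩
      intro hcx
      have hxm : x.toList = m := by rw [← he, String.toList_ofList]
      exact h3 x (List.contains_iff_mem.mp hcx) (hxm ▸ (pv_mem_cands raw.toList m).mp hm)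
  · rw [h1]
    have hrbk : rb ∈ known := by
      rcases h3 with h3 | h3
      · exact h3
      · cases h3
    by_cases hc : known.contains raw = true
    · -- A returns raw; rb must be raw
      rw [resolve_import_target_py, if_pos hc]
      have hq : pvQ raw.toList raw.toList := Or.inl rfl
      have hle : raw.toList.length ≤ rb.toList.length := h4 raw (List.contains_iff_mem.mp hc) hq
      have hge : rb.toList.length ≤ raw.toList.length := (pv_Q_prefix h2).length_le
      have : raw.toList = rb.toList := pv_Q_eq hq h2 (le_antisymm hle hge)
      rw [String.toList_inj.mp this]
    · rw [pv_A_eq_find raw known (by simpa using hc)]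
      -- rb.toList is a candidate; split the candidate list there
      have hmem : rb.toList ∈ pvCands raw.toList := (pv_mem_cands raw.toList rb.toList).mpr h2
      obtain ⟨c₁, c₂, hsplit⟩ := List.append_of_mem hmem
      have hpw := pv_cands_lt raw.toList
      rw [hsplit] at hpw
      have hpw2 : ∀ y ∈ c₂, rb.toList.length < y.length := by
        have hsub : (rb.toList :: c₂).Sublist (c₁ ++ rb.toList :: c₂) := List.sublist_append_right c₁ _
        have := List.Pairwise.sublist hsub hpw
        exact (List.pairwise_cons.mp this).1
      rw [hsplit, List.map_append, List.map_cons, List.reverse_append, List.reverse_cons,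
        List.append_assoc, List.find?_append]
      have hfirst : ((List.map (fun m => String.ofList m) c₂).reverse).find? (fun c => known.contains c) = none := by
        rw [List.find?_eq_none]
        intro x hx hcx
        rcases List.mem_map.mp (List.mem_reverse.mp hx) with ⟨y, hy, he⟩
        have hxy : x.toList = y := by rw [← he, String.toList_ofList]
        have hQy : pvQ raw.toList x.toList := by
          rw [hxy]
          exact (pv_mem_cands raw.toList y).mp (hsplit ▸ List.mem_append_right c₁ (List.mem_cons_of_mem _ hy))
        have := h4 x (List.contains_iff_mem.mp hcx) hQy
        rw [hxy] at this
        exact absurd this (not_le.mpr (hpw2 y hy))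
      rw [hfirst, Option.none_or]
      have hrb : String.ofList rb.toList = rb := String.ofList_toList
      rw [hrb, List.singleton_append, List.find?_cons_of_pos (List.contains_iff_mem.mpr hrbk)]
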